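-- pv_equiv track=rewrite | github.com/wilmurillo-ai/Design-Assistant | .skills/openclaw-skills/skills/eddieguan801-oss/trend-following/scripts/trend_strategy.py | find_nearest_levels
-- ===== SOURCE A (Python) =====
-- def find_nearest_levels(price, levels, direction, count=3):
--     """Find nearest levels above (direction='above') or below (direction='below')."""
--     if direction == 'above':
--         candidates = [l for l in levels if l > price]
--         candidates.sort()
--     else:
--         candidates = [l for l in levels if l < price]
--         candidates.sort(reverse=True)
--     return candidates[:count]
-- ===== SOURCE B (Python) =====
-- def find_nearest_levels(price, levels, direction, count=3):
--     """Find nearest levels above (direction='above') or below (direction='below')."""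
--     s = sorted(levels)
--     if direction == 'above':
--         i = sum(1 for l in s if l <= price)
--         return s[i:i + count]
--     i = sum(1 for l in s if l < price)
--     return s[max(0, i - count):i][::-1]
-- ===== Notes on version B (the rewrite author's own statement) =====
-- stated objective: alternative
-- what changed: Instead of filtering the levels by direction and sorting the filtered subset (descending for 'below'), B sorts the whole list once ascending, counts how many elements are at/below the price to get the split index, and returns a slice around that index (reversed for 'below').
-- outside the precondition, e.g. on find_nearest_levels(10, [5, 20, 30], 'above', -1): A returns [20], B returns []
import Mathlib
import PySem

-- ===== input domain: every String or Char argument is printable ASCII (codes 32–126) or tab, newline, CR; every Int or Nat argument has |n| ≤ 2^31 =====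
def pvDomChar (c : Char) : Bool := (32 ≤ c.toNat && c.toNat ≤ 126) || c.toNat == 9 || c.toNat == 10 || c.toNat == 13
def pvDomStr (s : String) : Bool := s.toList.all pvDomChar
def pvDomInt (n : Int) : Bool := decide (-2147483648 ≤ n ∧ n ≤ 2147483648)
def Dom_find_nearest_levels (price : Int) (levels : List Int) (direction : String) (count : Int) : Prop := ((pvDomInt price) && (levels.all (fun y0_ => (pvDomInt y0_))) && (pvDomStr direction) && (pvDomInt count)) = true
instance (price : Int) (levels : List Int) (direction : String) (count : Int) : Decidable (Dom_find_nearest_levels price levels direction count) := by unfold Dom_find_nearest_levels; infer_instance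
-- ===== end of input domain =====

-- B sorts the whole list once and slices around the counted split index, instead of
-- filtering by direction and sorting the filtered subset (objective: alternative algorithm).

-- ===== PORT A =====
def find_nearest_levels (price : Int) (levels : List Int) (direction : String) (count : Int) : List Int :=
  if direction == "above" then
    let candidates := PySem.List.sorted (levels.filter (fun l => decide (price < l))) (fun x => x) false
    PySem.List.slice candidates none (some count)
  else
    let candidates := PySem.List.sorted (levels.filter (fun l => decide (l < price))) (fun x => x) true
    PySem.List.slice candidates none (some count)

-- ===== PORT B =====
def find_nearest_levels_alt (price : Int) (levels : List Int) (direction : String) (count : Int) : List Int :=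
  let s := PySem.List.sorted levels (fun x => x) false
  if direction == "above" then
    let i : Int := (s.countP (fun l => decide (l ≤ price)) : Nat)
    PySem.List.slice s (some i) (some (i + count))
  else
    let i : Int := (s.countP (fun l => decide (l < price)) : Nat)
    (PySem.List.slice s (some (max 0 (i - count))) (some i)).reverse

-- ===== PRECONDITION & SPEC =====
-- Pre_ restricts count to the natural domain of non-negative counts; for a negative count
-- A still returns a value via Python's negative-slice semantics (dropping trailing elements),
-- which is outside the function's purpose of "the nearest `count` levels".
def Pre_find_nearest_levels (price : Int) (levels : List Int) (direction : String) (count : Int) : Prop :=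
  0 ≤ count
instance (price : Int) (levels : List Int) (direction : String) (count : Int) : Decidable (Pre_find_nearest_levels price levels direction count) := by unfold Pre_find_nearest_levels; infer_instance

def pvWitness_find_nearest_levels : Int × List Int × String × Int := (10, [5, 20, 30], "above", 2)

def Spec_find_nearest_levels (price : Int) (levels : List Int) (direction : String) (count : Int) (out : List Int) : Prop := out = find_nearest_levels_alt price levels direction count
instance (price : Int) (levels : List Int) (direction : String) (count : Int) (out : List Int) : Decidable (Spec_find_nearest_levels price levels direction count out) := by unfold Spec_find_nearest_levels; infer_instance

-- ===== CLAIM (what is proved, stated in full; the proofs are below) =====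
def Claim_equal_find_nearest_levels : Prop := ∀ (price : Int) (levels : List Int) (direction : String) (count : Int), Dom_find_nearest_levels price levels direction count → Pre_find_nearest_levels price levels direction count → Spec_find_nearest_levels price levels direction count (find_nearest_levels price levels direction count)

-- ===== LEMMAS AND PROOFS =====

-- sorting a filtered list = filtering the sorted list (Int, identity key)
theorem sorted_filter_comm (p : Int → Bool) (levels : List Int) :
    PySem.List.sorted (levels.filter p) (fun x => x) false
      = (PySem.List.sorted levels (fun x => x) false).filter p := by
  apply PySem.List.sorted_id_eq_of_perm_of_pairwise
  · exact (PySem.List.sorted_perm levels (fun x => x) false).filter p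
  · exact List.Pairwise.sublist List.filter_sublist (PySem.List.sorted_pairwise levels (fun x => x))

-- on a ≤-sorted list, the elements > price are exactly the suffix after the count of elements ≤ price
theorem filter_gt_eq_drop (price : Int) (s : List Int) (hs : s.Pairwise (· ≤ ·)) :
    s.filter (fun l => decide (price < l)) = s.drop (s.countP (fun l => decide (l ≤ price))) := by
  induction s with
  | nil => simp
  | cons a t ih =>
    rcases List.pairwise_cons.mp hs with ⟨ha, ht⟩
    by_cases h : a ≤ price
    · simp [h, not_lt.mpr h, ih ht]
    · rw [not_le] at h
      have hall : ∀ x ∈ t, price < x := fun x hx => lt_of_lt_of_le h (ha x hx)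
      have hz : t.countP (fun l => decide (l ≤ price)) = 0 :=
        List.countP_eq_zero.mpr (fun x hx => by simp [not_le.mpr (hall x hx)])
      have hfil : t.filter (fun l => decide (price < l)) = t :=
        List.filter_eq_self.mpr (fun x hx => decide_eq_true (hall x hx))
      simp [h, not_le.mpr h, hz, hfil]

-- on a ≤-sorted list, the elements < price are exactly the prefix of length countP (< price)
theorem filter_lt_eq_take (price : Int) (s : List Int) (hs : s.Pairwise (· ≤ ·)) :
    s.filter (fun l => decide (l < price)) = s.take (s.countP (fun l => decide (l < price))) := by
  induction s with
  | nil => simp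
  | cons a t ih =>
    rcases List.pairwise_cons.mp hs with ⟨ha, ht⟩
    by_cases h : a < price
    · simp [h, ih ht]
    · rw [not_lt] at h
      have hall : ∀ x ∈ t, ¬ x < price := fun x hx => not_lt.mpr (le_trans h (ha x hx))
      have hz : t.countP (fun l => decide (l < price)) = 0 :=
        List.countP_eq_zero.mpr (fun x hx => by simp [hall x hx])
      have hfil : t.filter (fun l => decide (l < price)) = [] :=
        List.filter_eq_nil_iff.mpr (fun x hx => by simp [hall x hx])
      simp [not_lt.mpr h, hz, hfil]

-- descending sort of the < price elements = reverse of the < price prefix of the ascending sort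
theorem sorted_rev_lt_eq (price : Int) (levels : List Int) :
    PySem.List.sorted (levels.filter (fun l => decide (l < price))) (fun x => x) true
      = ((PySem.List.sorted levels (fun x => x) false).filter (fun l => decide (l < price))).reverse := by
  refine List.Perm.eq_of_pairwise (le := fun a b : Int => b ≤ a)
    (fun a b _ _ h1 h2 => le_antisymm h2 h1) ?_ ?_ ?_
  · exact PySem.List.sorted_pairwise_rev _ _
  · exact (List.pairwise_reverse).mpr
      (List.Pairwise.sublist List.filter_sublist (PySem.List.sorted_pairwise levels (fun x => x)))
  · refine ((PySem.List.sorted_perm _ _ _).trans ?_).trans (List.reverse_perm _).symm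
    exact ((PySem.List.sorted_perm levels (fun x => x) false).filter _).symm

-- ===== VERDICT (by name: the statement is the Claim_ definition above) =====
theorem find_nearest_levels_spec : Claim_equal_find_nearest_levels := by
  intro price levels direction count _ hc
  unfold Pre_find_nearest_levels at hc
  unfold Spec_find_nearest_levels find_nearest_levels find_nearest_levels_alt
  set s := PySem.List.sorted levels (fun x => x) false with hsdef
  have hs : s.Pairwise (· ≤ ·) := PySem.List.sorted_pairwise levels (fun x => x)
  by_cases hdir : (direction == "above") = true
  · simp only [hdir, if_true]
    set i := s.countP (fun l => decide (l ≤ price)) with hidef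
    have hi : (i : Int) + count = ((i + count.toNat : Nat) : Int) := by push_cast; omega
    rw [sorted_filter_comm, ← hsdef, filter_gt_eq_drop price s hs, ← hidef,
        PySem.List.slice_to _ hc, hi, PySem.List.slice_natCast]
    congr 1
    omega
  · rw [Bool.not_eq_true] at hdir
    simp only [hdir, Bool.false_eq_true, if_false]
    set i := s.countP (fun l => decide (l < price)) with hidef
    have hlen : i ≤ s.length := List.countP_le_length
    rw [sorted_rev_lt_eq, ← hsdef, filter_lt_eq_take price s hs, ← hidef,
        PySem.List.slice_to _ hc]
    have hj : max 0 ((i : Int) - count) = ((i - count.toNat : Nat) : Int) := by omega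
    rw [hj, PySem.List.slice_natCast,
        List.take_reverse, List.length_take, Nat.min_eq_left hlen, List.drop_take]
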